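-- pv_equiv track=rewrite | github.com/shehryarkh4n/RII-HUB | sites/scopus/author-search/basic-export/utils.py | parse_author_ids
-- ===== SOURCE A (Python) =====
-- from typing import Dict, List, Any, Optional, Tuple
--
-- def parse_author_ids(cell: str) -> List[str]:
--     if not cell: return []
--     tmp = cell.replace(",", ";").replace("\t", ";").replace("|", ";")
--     parts = [p.strip() for p in tmp.split(";")]
--     ids: List[str] = []
--     for p in parts:
--         if not p: continue
--         ids.extend([q for q in p.split() if q])
--     return [x for x in ids if x.isdigit()]
-- ===== SOURCE B (Python) =====
-- def parse_author_ids(cell: str):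
--     # single left-to-right scan: flush the pending token at every delimiter,
--     # keeping it only when it is all digits
--     out = []
--     tok = ""
--     for ch in cell:
--         if ch in ",;|" or ch.isspace():
--             if tok.isdigit():
--                 out.append(tok)
--             tok = ""
--         else:
--             tok += ch
--     if tok.isdigit():
--         out.append(tok)
--     return out
-- ===== Notes on version B (the rewrite author's own statement) =====
-- stated objective: alternative
-- what changed: Replaces A's four-stage pipeline (three substring replaces, split on ';', per-piece strip, whitespace re-split, two filters) by a single left-to-right character scan that flushes the pending token at each delimiter and keeps it only when it is all digits.
import Mathlib
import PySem

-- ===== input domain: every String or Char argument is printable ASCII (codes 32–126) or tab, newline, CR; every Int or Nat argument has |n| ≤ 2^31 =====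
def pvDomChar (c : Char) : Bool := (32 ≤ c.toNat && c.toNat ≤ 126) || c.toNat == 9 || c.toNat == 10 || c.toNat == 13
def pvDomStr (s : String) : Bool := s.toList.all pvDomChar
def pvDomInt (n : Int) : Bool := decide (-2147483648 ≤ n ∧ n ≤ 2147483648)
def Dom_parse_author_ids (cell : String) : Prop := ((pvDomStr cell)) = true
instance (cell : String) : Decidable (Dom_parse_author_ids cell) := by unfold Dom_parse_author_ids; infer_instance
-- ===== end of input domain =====

-- B replaces A's replace/split(";")/strip/split() pipeline by one left-to-right character
-- scan with a pending-token accumulator (alternative decomposition, same O(n) cost).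


-- ===== PORT A =====
def parse_author_ids (cell : String) : List String :=
  if cell == "" then []
  else
    let tmp := PySem.Str.replace (PySem.Str.replace (PySem.Str.replace cell "," ";") "\t" ";") "|" ";"
    let parts := ((PySem.Str.split? tmp ";").getD []).map PySem.Str.strip
    let ids := parts.foldl
      (fun ids p => if p == "" then ids
                    else ids ++ (PySem.Str.split₀ p).filter (fun q => !(q == ""))) []
    ids.filter (fun x => PySem.Str.strIsdigit x)

-- ===== PORT B =====
-- B's delimiter test: ch in ",;|" or ch.isspace()
def pvDelim (c : Char) : Bool := c == ',' || c == ';' || c == '|' || PySem.Chars.isspace c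

def parse_author_ids_alt (cell : String) : List String :=
  let r := cell.toList.foldl
    (fun (acc : List String × List Char) ch =>
      if pvDelim ch then
        (if PySem.Chars.strIsdigit acc.2 then acc.1 ++ [String.ofList acc.2] else acc.1, [])
      else (acc.1, acc.2 ++ [ch]))
    ([], [])
  if PySem.Chars.strIsdigit r.2 then r.1 ++ [String.ofList r.2] else r.1

-- ===== PRECONDITION & SPEC =====
def Spec_parse_author_ids (cell : String) (out : List String) : Prop := out = parse_author_ids_alt cell
instance (cell : String) (out : List String) : Decidable (Spec_parse_author_ids cell out) := by unfold Spec_parse_author_ids; infer_instance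

-- ===== CLAIM (what is proved, stated in full; the proofs are below) =====
def Claim_equal_parse_author_ids : Prop := ∀ (cell : String), Dom_parse_author_ids cell → Spec_parse_author_ids cell (parse_author_ids cell)

-- ===== LEMMAS AND PROOFS =====

-- maximal runs of non-delimiter characters of `cs`, with pending token `tok`
def wordsAux (p : Char → Bool) : List Char → List Char → List (List Char)
  | [], tok => if tok.isEmpty then [] else [tok]
  | c :: t, tok =>
      if p c then (if tok.isEmpty then wordsAux p t [] else tok :: wordsAux p t [])
      else wordsAux p t (tok ++ [c])

-- the pieces of a split at ';', with pending piece `cur`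
def piecesSemi : List Char → List Char → List (List Char)
  | [], cur => [cur]
  | c :: t, cur => if c == ';' then cur :: piecesSemi t [] else piecesSemi t (cur ++ [c])

-- the combined delimiter predicate reached from A's side
def pqPred (c : Char) : Bool := PySem.Chars.isspace c || c == ';'

-- A's three replaces, as one character map
def repF (c : Char) : Char :=
  if c == ',' then ';' else if c == '\t' then ';' else if c == '|' then ';' else c

theorem wa_all_delim (p : Char → Bool) (sp : List Char) :
    (∀ c ∈ sp, p c = true) → ∀ (tok : List Char),
      wordsAux p sp tok = if tok.isEmpty then [] else [tok] := by
  induction sp with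
  | nil => intro _ tok; rfl
  | cons c t ih =>
      intro h tok
      have hc : p c = true := h c (List.mem_cons_self ..)
      have ht : ∀ c ∈ t, p c = true := fun x hx => h x (List.mem_cons_of_mem _ hx)
      by_cases htok : tok.isEmpty = true <;>
        simp [wordsAux, hc, htok, ih ht]

theorem wa_append_delims (p : Char → Bool) (cs sp : List Char) (h : ∀ c ∈ sp, p c = true)
    (tok : List Char) : wordsAux p (cs ++ sp) tok = wordsAux p cs tok := by
  induction cs generalizing tok with
  | nil =>
      simp only [List.nil_append]
      rw [wa_all_delim p sp h tok]; rfl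
  | cons c t ih =>
      by_cases hc : p c = true <;> by_cases htok : tok.isEmpty = true <;>
        simp [wordsAux, hc, htok, ih]

theorem wa_delim_split (p : Char → Bool) (c : Char) (hc : p c = true) (t : List Char) :
    ∀ (xs tok : List Char),
      wordsAux p (xs ++ c :: t) tok = wordsAux p xs tok ++ wordsAux p t [] := by
  intro xs
  induction xs with
  | nil =>
      intro tok
      by_cases htok : tok.isEmpty = true <;> simp [wordsAux, hc, htok]
  | cons x xs ih =>
      intro tok
      by_cases hx : p x = true <;> by_cases htok : tok.isEmpty = true <;>
        simp [wordsAux, hx, htok, ih]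

theorem wa_congr (p p' : Char → Bool) (cs : List Char) (h : ∀ c ∈ cs, p c = p' c)
    (tok : List Char) : wordsAux p cs tok = wordsAux p' cs tok := by
  induction cs generalizing tok with
  | nil => rfl
  | cons c t ih =>
      have hc := h c (List.mem_cons_self ..)
      have ht : ∀ c ∈ t, p c = p' c := fun x hx => h x (List.mem_cons_of_mem _ hx)
      by_cases hpc : p' c = true <;>
        simp [wordsAux, hc, hpc, ih ht]

theorem wa_map (p : Char → Bool) (f : Char → Char) (h : ∀ c, p (f c) = true ∨ f c = c)
    (cs : List Char) (tok : List Char) :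
    wordsAux p (cs.map f) tok = wordsAux (fun c => p (f c)) cs tok := by
  induction cs generalizing tok with
  | nil => rfl
  | cons c t ih =>
      by_cases hc : p (f c) = true
      · simp [wordsAux, hc, ih]
      · have hfc : f c = c := (h c).resolve_left hc
        simp [wordsAux, hfc, ih]

theorem wa_ne_nil (p : Char → Bool) (cs : List Char) (tok w : List Char)
    (hw : w ∈ wordsAux p cs tok) : w ≠ [] := by
  induction cs generalizing tok with
  | nil =>
      by_cases htok : tok.isEmpty = true <;> simp [wordsAux, htok] at hw
      · subst hw; simpa [List.isEmpty_iff] using htok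
  | cons c t ih =>
      by_cases hc : p c = true <;> by_cases htok : tok.isEmpty = true <;>
        simp [wordsAux, hc, htok] at hw
      · exact ih [] hw
      · rcases hw with hw | hw
        · subst hw; simpa [List.isEmpty_iff] using htok
        · exact ih [] hw
      · exact ih _ hw
      · exact ih _ hw

theorem split₀_go_eq (cs cur : List Char) (accl : List (List Char)) :
    PySem.Chars.split₀.go cs cur accl = accl.reverse ++ wordsAux PySem.Chars.isspace cs cur.reverse := by
  induction cs generalizing cur accl with
  | nil =>
      by_cases hcur : cur.isEmpty = true <;>
        simp [PySem.Chars.split₀.go, wordsAux, hcur]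
  | cons c t ih =>
      by_cases hc : PySem.Chars.isspace c = true
      · by_cases hcur : cur.isEmpty = true
        · have : cur = [] := by simpa [List.isEmpty_iff] using hcur
          subst this
          simp [PySem.Chars.split₀.go, hc, wordsAux, ih]
        · have hcr : cur.reverse.isEmpty = false := by
            simp [List.isEmpty_iff] at hcur ⊢; simpa using hcur
          simp [PySem.Chars.split₀.go, hc, hcur, wordsAux, ih, hcr]
      · have hcr : (c :: cur).reverse = cur.reverse ++ [c] := by simp
        simp [PySem.Chars.split₀.go, hc, wordsAux, ih, hcr]

theorem split₀_eq (cs : List Char) :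
    PySem.Chars.split₀ cs = wordsAux PySem.Chars.isspace cs [] := by
  simpa using split₀_go_eq cs [] []

theorem wa_lstrip (cs : List Char) :
    wordsAux PySem.Chars.isspace (PySem.Chars.lstrip cs) [] =
      wordsAux PySem.Chars.isspace cs [] := by
  induction cs with
  | nil => rfl
  | cons c t ih =>
      by_cases hc : PySem.Chars.isspace c = true
      · rw [show PySem.Chars.lstrip (c :: t) = PySem.Chars.lstrip t by
            simp [PySem.Chars.lstrip, hc]]
        rw [ih]
        simp [wordsAux, hc]
      · simp [PySem.Chars.lstrip, hc]

theorem wa_rstrip (cs : List Char) (tok : List Char) :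
    wordsAux PySem.Chars.isspace (PySem.Chars.rstrip cs) tok =
      wordsAux PySem.Chars.isspace cs tok := by
  have hdec : (List.dropWhile PySem.Chars.isspace cs.reverse).reverse ++
      (List.takeWhile PySem.Chars.isspace cs.reverse).reverse = cs := by
    rw [← List.reverse_append, List.takeWhile_append_dropWhile, List.reverse_reverse]
  have hsp : ∀ c ∈ (List.takeWhile PySem.Chars.isspace cs.reverse).reverse,
      PySem.Chars.isspace c = true := by
    intro c hcmem
    exact List.mem_takeWhile_imp (List.mem_reverse.mp hcmem)
  conv_rhs => rw [← hdec]
  rw [wa_append_delims _ _ _ hsp]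
  rfl

theorem wa_strip (cs : List Char) :
    wordsAux PySem.Chars.isspace (PySem.Chars.strip cs) [] =
      wordsAux PySem.Chars.isspace cs [] := by
  rw [PySem.Chars.strip, wa_rstrip, wa_lstrip]

theorem splitOn_go_eq (fuel : Nat) :
    ∀ (l cur : List Char) (accl : List (List Char)), l.length ≤ fuel →
      PySem.Chars.splitOn.go [';'] fuel l cur accl = accl.reverse ++ piecesSemi l cur.reverse := by
  induction fuel with
  | zero =>
      intro l cur accl hl
      have : l = [] := List.eq_nil_of_length_eq_zero (Nat.le_zero.mp hl)
      subst this
      simp [PySem.Chars.splitOn.go, piecesSemi]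
  | succ n ih =>
      intro l cur accl hl
      cases l with
      | nil => simp [PySem.Chars.splitOn.go, piecesSemi]
      | cons c rest =>
          by_cases hc : c = ';'
          · subst hc
            have hpre : List.isPrefixOf [';'] (';' :: rest) = true := by
              simp [List.isPrefixOf]
            simp only [PySem.Chars.splitOn.go, hpre, if_true, List.drop_succ_cons,
              List.length_cons, List.length_nil, List.drop_zero] at *
            rw [ih rest [] (cur.reverse :: accl) (Nat.le_of_succ_le_succ hl)]
            simp [piecesSemi]
          · have hpre : List.isPrefixOf [';'] (c :: rest) = false := by
              simp [List.isPrefixOf]; exact fun h => hc h.symm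
            have hcb : (c == ';') = false := by simpa using hc
            simp only [PySem.Chars.splitOn.go, hpre, Bool.false_eq_true, if_false,
              List.length_cons] at *
            rw [ih rest (c :: cur) accl (Nat.le_of_succ_le_succ hl)]
            simp [piecesSemi, hcb]

theorem splitOn_eq (cs : List Char) :
    PySem.Chars.splitOn cs [';'] = piecesSemi cs [] := by
  have := splitOn_go_eq (cs.length + 1) cs [] [] (Nat.le_succ _)
  simpa [PySem.Chars.splitOn] using this

theorem pieces_flatMap (cs : List Char) :
    ∀ (cur : List Char), (∀ c ∈ cur, (c == ';') = false) →
      (piecesSemi cs cur).flatMap (fun pc => wordsAux PySem.Chars.isspace pc []) =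
        wordsAux pqPred (cur ++ cs) [] := by
  induction cs with
  | nil =>
      intro cur hcur
      simp only [piecesSemi, List.flatMap_cons, List.flatMap_nil, List.append_nil]
      exact wa_congr _ _ cur (by
        intro c hcmem
        simp [pqPred, hcur c hcmem]) []
  | cons c t ih =>
      intro cur hcur
      by_cases hc : c = ';'
      · subst hc
        have hdel : pqPred ';' = true := by decide
        simp only [piecesSemi, beq_self_eq_true, if_true, List.flatMap_cons]
        rw [ih [] (by simp), wa_delim_split pqPred ';' hdel t cur []]
        congr 1
        exact wa_congr _ _ cur (by
          intro x hxmem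
          simp [pqPred, hcur x hxmem]) []
      · have hcb : (c == ';') = false := by simpa using hc
        simp only [piecesSemi, hcb, Bool.false_eq_true, if_false]
        rw [ih (cur ++ [c]) (by
          intro x hxmem
          rcases List.mem_append.mp hxmem with hx | hx
          · exact hcur x hx
          · simp at hx; subst hx; exact hcb)]
        simp

-- B's fold, characterised
def pvStep (acc : List String × List Char) (ch : Char) : List String × List Char :=
  if pvDelim ch then
    (if PySem.Chars.strIsdigit acc.2 then acc.1 ++ [String.ofList acc.2] else acc.1, [])
  else (acc.1, acc.2 ++ [ch])

def pvFlush (r : List String × List Char) : List String :=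
  if PySem.Chars.strIsdigit r.2 then r.1 ++ [String.ofList r.2] else r.1

theorem alt_fold (cs : List Char) :
    ∀ (out : List String) (tok : List Char),
      pvFlush (cs.foldl pvStep (out, tok)) =
        out ++ ((wordsAux pvDelim cs tok).filter PySem.Chars.strIsdigit).map String.ofList := by
  induction cs with
  | nil =>
      intro out tok
      by_cases htok : tok.isEmpty = true
      · have : tok = [] := by simpa [List.isEmpty_iff] using htok
        subst this
        simp [pvFlush, wordsAux]
        decide
      · by_cases hd : PySem.Chars.strIsdigit tok = true <;>
          simp [pvFlush, wordsAux, htok, hd, List.filter]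
  | cons c t ih =>
      intro out tok
      by_cases hc : pvDelim c = true
      · by_cases htok : tok.isEmpty = true
        · have : tok = [] := by simpa [List.isEmpty_iff] using htok
          subst this
          have hdz : PySem.Chars.strIsdigit ([] : List Char) = false := by decide
          simp only [List.foldl_cons, pvStep, hc, if_true, hdz, Bool.false_eq_true, if_false]
          rw [ih]
          simp [wordsAux, hc]
        · by_cases hd : PySem.Chars.strIsdigit tok = true <;>
            simp only [List.foldl_cons, pvStep, hc, if_true, hd, Bool.false_eq_true, if_false] <;>
            rw [ih] <;>
            simp [wordsAux, hc, htok, hd]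
      · simp only [List.foldl_cons, pvStep, hc, Bool.false_eq_true, if_false]
        rw [ih]
        simp [wordsAux, hc]

theorem pq_repF_eq_pvDelim (c : Char) : pqPred (repF c) = pvDelim c := by
  by_cases h1 : c = ','
  · subst h1; decide
  · by_cases h2 : c = '\t'
    · subst h2; decide
    · by_cases h3 : c = '|'
      · subst h3; decide
      · have hf : repF c = c := by
          simp [repF, h1, h2, h3]
        rw [hf]
        have b1 : (c == ',') = false := by simpa using h1
        have b3 : (c == '|') = false := by simpa using h3
        simp [pqPred, pvDelim, b1, b3, Bool.or_comm]

theorem repF_cases (c : Char) : pqPred (repF c) = true ∨ repF c = c := by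
  by_cases h1 : c = ','
  · subst h1; left; decide
  · by_cases h2 : c = '\t'
    · subst h2; left; decide
    · by_cases h3 : c = '|'
      · subst h3; left; decide
      · right; simp [repF, h1, h2, h3]

theorem replace_single_go (a b : Char) (fuel : Nat) :
    ∀ (l acc : List Char), l.length ≤ fuel →
      PySem.Chars.replace.go [a] [b] fuel l acc =
        acc.reverse ++ l.map (fun c => if c == a then b else c) := by
  induction fuel with
  | zero =>
      intro l acc hl
      have : l = [] := List.eq_nil_of_length_eq_zero (Nat.le_zero.mp hl)
      subst this
      simp [PySem.Chars.replace.go]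
  | succ n ih =>
      intro l acc hl
      cases l with
      | nil => simp [PySem.Chars.replace.go]
      | cons c rest =>
          by_cases hc : c = a
          · subst hc
            have hpre : List.isPrefixOf [c] (c :: rest) = true := by simp [List.isPrefixOf]
            simp only [PySem.Chars.replace.go, hpre, if_true, List.length_cons,
              List.length_nil, List.drop_succ_cons, List.drop_zero] at *
            rw [ih rest ([b].reverse ++ acc) (Nat.le_of_succ_le_succ hl)]
            simp
          · have hpre : List.isPrefixOf [a] (c :: rest) = false := by
              simp [List.isPrefixOf]; exact fun h => hc h.symm
            have hcb : (c == a) = false := by simpa using hc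
            simp only [PySem.Chars.replace.go, hpre, Bool.false_eq_true, if_false,
              List.length_cons] at *
            rw [ih rest (c :: acc) (Nat.le_of_succ_le_succ hl)]
            simp [hc]

theorem replace_single (a b : Char) (cs : List Char) :
    PySem.Chars.replace cs [a] [b] = cs.map (fun c => if c == a then b else c) := by
  have := replace_single_go a b cs.length cs [] (Nat.le_refl _)
  simpa [PySem.Chars.replace] using this

-- A's whole pipeline, characterised
theorem a_pipeline (cell : String) :
    parse_author_ids cell =
      ((wordsAux pvDelim cell.toList []).filter PySem.Chars.strIsdigit).map String.ofList := by
  by_cases hnil : cell == ""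
  · have : cell = "" := by simpa using hnil
    subst this
    simp [parse_author_ids, wordsAux]
  · unfold parse_author_ids
    rw [if_neg (by simpa using hnil)]
    -- tmp as a character map over cell.toList
    have htmp : (PySem.Str.replace (PySem.Str.replace (PySem.Str.replace cell "," ";") "\t" ";") "|" ";").toList
        = cell.toList.map repF := by
      simp only [PySem.Str.toList_replace,
        show (",":String).toList = [','] from rfl, show (";":String).toList = [';'] from rfl,
        show ("\t":String).toList = ['\t'] from rfl, show ("|":String).toList = ['|'] from rfl]
      rw [replace_single, replace_single, replace_single]
      simp only [List.map_map]
      apply List.map_congr_left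
      intro c _
      simp [Function.comp, repF]
      split_ifs <;> rfl
    set tmp := PySem.Str.replace (PySem.Str.replace (PySem.Str.replace cell "," ";") "\t" ";") "|" ";" with htmpdef
    -- the split? on ";" always succeeds
    have hsplit : (PySem.Str.split? tmp ";").getD []
        = (piecesSemi (cell.toList.map repF) []).map String.ofList := by
      simp only [PySem.Str.split?, PySem.Chars.split?,
        show (";":String).toList = [';'] from rfl]
      rw [htmp]
      simp [splitOn_eq]
    simp only [hsplit]
    -- the loop body never actually skips, and the inner filter is a no-op
    have hstep : ∀ (ids : List String) (p : String),
        (if p == "" then ids else ids ++ (PySem.Str.split₀ p).filter (fun q => !(q == "")))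
          = ids ++ (PySem.Str.split₀ p).filter (fun q => !(q == "")) := by
      intro ids p
      by_cases hp : p == ""
      · have : p = "" := by simpa using hp
        subst this
        simp [PySem.Str.split₀, split₀_eq, wordsAux]
      · rw [if_neg hp]
    rw [PySem.List.foldl_congr_mem' _ _
          (fun ids p => ids ++ (PySem.Str.split₀ p).filter (fun q => !(q == ""))) _
          (fun p _ ids => hstep ids p),
        PySem.List.foldl_append_eq_flatMap]
    -- push everything to the character level
    rw [List.flatMap_map, List.flatMap_map, List.nil_append]
    have hbody : ∀ pc : List Char,
        (PySem.Str.split₀ (PySem.Str.strip (String.ofList pc))).filter (fun q => !(q == ""))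
          = (wordsAux PySem.Chars.isspace pc []).map String.ofList := by
      intro pc
      have hstrip : PySem.Str.strip (String.ofList pc) = String.ofList (PySem.Chars.strip pc) := by
        simp [PySem.Str.strip]
      rw [hstrip]
      have hsp : PySem.Str.split₀ (String.ofList (PySem.Chars.strip pc))
          = (wordsAux PySem.Chars.isspace pc []).map String.ofList := by
        simp only [PySem.Str.split₀]
        rw [show (String.ofList (PySem.Chars.strip pc)).toList = PySem.Chars.strip pc by simp,
            split₀_eq, wa_strip]
      rw [hsp, List.filter_map]
      rw [List.filter_eq_self.mpr]
      intro w hw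
      have := wa_ne_nil _ _ _ _ hw
      simp [Function.comp, String.ofList_eq_empty_iff, this]
    rw [show (fun a => (PySem.Str.split₀ (PySem.Str.strip (String.ofList a))).filter (fun q => !(q == "")))
          = (fun a => (wordsAux PySem.Chars.isspace a []).map String.ofList) from funext hbody]
    rw [(List.map_flatMap (f := String.ofList)
          (g := fun a => wordsAux PySem.Chars.isspace a [])
          (l := piecesSemi (cell.toList.map repF) [])).symm,
        pieces_flatMap (cell.toList.map repF) [] (by simp)]
    simp only [List.nil_append]
    rw [wa_map pqPred repF repF_cases,
        wa_congr _ pvDelim _ (fun c _ => pq_repF_eq_pvDelim c)]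
    rw [List.filter_map]
    refine congrArg (List.map String.ofList) (List.filter_congr ?_)
    intro w _
    simp [Function.comp, PySem.Str.strIsdigit]

-- ===== VERDICT (by name: the statement is the Claim_ definition above) =====
theorem parse_author_ids_spec : Claim_equal_parse_author_ids := by
  intro cell _
  unfold Spec_parse_author_ids
  rw [a_pipeline]
  have hb : parse_author_ids_alt cell = pvFlush (cell.toList.foldl pvStep ([], [])) := rfl
  rw [hb, alt_fold cell.toList [] []]
  simp
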